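-- pv_equiv track=rewrite | github.com/bozhidaratanasov/Python-Exercises | Fundamental Exercises/04-Functions/10-array_manipulator.py | get_min_even_odd
-- ===== SOURCE A (Python) =====
-- def get_min_even_odd(num_list, num_type: str):
--     odd_list = []
--     even_list = []
--     if num_type == 'odd':
--         for el in num_list:
--             if el % 2 == 1:
--                 odd_list.append(el)
--             else:
--                 return "No matches"
--         min_odd = min(odd_list)
--         for i in range(len(num_list) - 1, -1, -1):
--             if num_list[i] == min_odd:
--                 return i
--     elif num_type == 'even':
--         for el in num_list:
--             if el % 2 == 0:
--                 even_list.append(el)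
--         if len(even_list) == 0:
--             return 'No matches'
--         min_even = min(even_list)
--         for i in range(len(num_list) - 1, -1, -1):
--             if num_list[i] == min_even:
--                 return i
-- ===== SOURCE B (Python) =====
-- def _min_last_idx(num_list, p):
--     """One pass: minimum among elements satisfying p, and the last index holding it."""
--     best = idx = None
--     for i, el in enumerate(num_list):
--         if p(el):
--             if best is None or el < best:
--                 best, idx = el, i
--             elif el == best:
--                 idx = i
--     return best, idx
--
--
-- def get_min_even_odd(num_list, num_type: str):
--     if num_type == 'even':
--         best, idx = _min_last_idx(num_list, lambda el: el % 2 == 0)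
--         return 'No matches' if best is None else idx
--     if num_type == 'odd':
--         if any(el % 2 == 0 for el in num_list):
--             return 'No matches'
--         _, idx = _min_last_idx(num_list, lambda el: True)
--         return idx
-- ===== Notes on version B (the rewrite author's own statement) =====
-- stated objective: alternative
-- what changed: A builds a filtered list, calls min(), then scans the list backwards for the index; B makes one left-to-right pass keeping (best value, last index holding it) and never materialises a filtered list. B reproduces A everywhere A returns, including the string 'No matches' sentinel; those string-returning inputs lie outside Pre_ only because the declared Option Int return type cannot represent a string, not because B behaves differently there.
-- outside the precondition, e.g. on get_min_even_odd([2, 3], 'odd'): A returns 'No matches', B returns 'No matches'; on get_min_even_odd([1, 3], 'even'): A returns 'No matches', B returns 'No matches'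
import Mathlib
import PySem

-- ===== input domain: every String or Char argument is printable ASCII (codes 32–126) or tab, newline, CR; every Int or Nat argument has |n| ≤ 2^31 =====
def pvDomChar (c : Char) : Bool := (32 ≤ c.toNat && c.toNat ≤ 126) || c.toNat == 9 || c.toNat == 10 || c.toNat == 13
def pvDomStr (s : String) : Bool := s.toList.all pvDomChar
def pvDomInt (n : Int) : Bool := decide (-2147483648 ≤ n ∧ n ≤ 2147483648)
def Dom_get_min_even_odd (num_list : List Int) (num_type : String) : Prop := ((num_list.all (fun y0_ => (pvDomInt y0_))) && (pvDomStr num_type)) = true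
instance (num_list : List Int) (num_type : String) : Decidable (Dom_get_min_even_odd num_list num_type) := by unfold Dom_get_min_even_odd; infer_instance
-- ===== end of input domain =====

-- B replaces A's filter-list + min() + backward index scan with a single left-to-right pass keeping
-- (best value, last index of it); B agrees with A on EVERY input A returns on, including the string
-- sentinel 'No matches', which B also returns in Python (objective: alternative).

-- ===== PORT A =====
-- the odd-branch loop: append odd elements; on an even element Python returns the STRING
-- "No matches", which Option Int cannot hold, so that outcome is `none` here and outside Pre_
def pvCollectOdd (acc : List Int) : List Int → Option (List Int)
  | [] => some acc
  | el :: rest =>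
    if PySem.Int.mod el 2 == 1 then pvCollectOdd (acc ++ [el]) rest else none

-- `for i in range(len-1, -1, -1): if num_list[i] == m: return i`, ported as a countdown over indices
def pvBackFind (l : List Int) (m : Int) : Nat → Option Int
  | 0 => none
  | j + 1 =>
    if PySem.List.pyGet? l (j : Int) == some m then some (j : Int) else pvBackFind l m j

def get_min_even_odd (num_list : List Int) (num_type : String) : Option Int :=
  if num_type == "odd" then
    match pvCollectOdd [] num_list with
    | none => none          -- Python: the STRING "No matches" — not an Option Int value (outside Pre_)
    | some odd_list =>
      match PySem.List.min? odd_list (fun x => x) with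
      | none => none        -- Python: min([]) raises ValueError (outside Pre_)
      | some min_odd => pvBackFind num_list min_odd num_list.length
  else if num_type == "even" then
    let even_list := num_list.foldl (fun acc el => if PySem.Int.mod el 2 == 0 then acc ++ [el] else acc) []
    if even_list.length == 0 then none   -- Python: the STRING "No matches" (outside Pre_)
    else
      match PySem.List.min? even_list (fun x => x) with
      | none => none
      | some min_even => pvBackFind num_list min_even num_list.length
  else none

-- ===== PORT B =====
-- Source B's _min_last_idx: one pass, state = none | some (best value, last index holding it)
def pvScan (p : Int → Bool) : List Int → Int → Option (Int × Int) → Option (Int × Int)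
  | [], _, best => best
  | el :: rest, i, best =>
    pvScan p rest (i + 1)
      (if p el then
        match best with
        | none => some (el, i)
        | some (b, j) =>
          if el < b then some (el, i)
          else if el = b then some (el, i)
          else some (b, j)
       else best)

def get_min_even_odd_alt (num_list : List Int) (num_type : String) : Option Int :=
  if num_type == "even" then
    match pvScan (fun el => PySem.Int.mod el 2 == 0) num_list 0 none with
    | none => none          -- Python B: the same STRING "No matches" as A (outside Pre_)
    | some (_, idx) => some idx
  else if num_type == "odd" then
    if num_list.any (fun el => PySem.Int.mod el 2 == 0) then none   -- Python B: the same STRING "No matches" as A (outside Pre_)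
    else (pvScan (fun _ => true) num_list 0 none).map (fun bi => bi.2)
  else none

-- ===== PRECONDITION & SPEC =====
-- Pre_ excludes only (a) the odd branch on an empty list, where A raises ValueError (min([])),
-- and (b) the inputs where A returns the STRING 'No matches' — a value outside the declared
-- Option Int return type, which the typed ports cannot represent; B returns the identical
-- string 'No matches' on exactly those inputs in Python, so nothing behavioural is being dodged.
def Pre_get_min_even_odd (num_list : List Int) (num_type : String) : Prop :=
  (num_type = "odd" → num_list ≠ [] ∧ ∀ el ∈ num_list, PySem.Int.mod el 2 = 1) ∧
  (num_type = "even" → ∃ el ∈ num_list, PySem.Int.mod el 2 = 0)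
instance (num_list : List Int) (num_type : String) : Decidable (Pre_get_min_even_odd num_list num_type) := by
  unfold Pre_get_min_even_odd; infer_instance

def pvWitness_get_min_even_odd : List Int × String := ([4, 7, 2, 2], "even")

def Spec_get_min_even_odd (num_list : List Int) (num_type : String) (out : Option Int) : Prop := out = get_min_even_odd_alt num_list num_type
instance (num_list : List Int) (num_type : String) (out : Option Int) : Decidable (Spec_get_min_even_odd num_list num_type out) := by unfold Spec_get_min_even_odd; infer_instance

-- ===== CLAIM (what is proved, stated in full; the proofs are below) =====
def Claim_equal_get_min_even_odd : Prop := ∀ (num_list : List Int) (num_type : String), Dom_get_min_even_odd num_list num_type → Pre_get_min_even_odd num_list num_type → Spec_get_min_even_odd num_list num_type (get_min_even_odd num_list num_type)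

-- ===== LEMMAS AND PROOFS =====

-- reference of the single pass, computed from the right: (min over elements satisfying p,
-- last (Nat) position achieving it); ties go to the tail
def pvBest (p : Int → Bool) : List Int → Option (Int × Nat)
  | [] => none
  | el :: rest =>
    match pvBest p rest with
    | none => if p el then some (el, 0) else none
    | some (m, k) => if p el ∧ el < m then some (el, 0) else some (m, k + 1)

theorem pvScan_acc (p : Int → Bool) : ∀ (l : List Int) (i b j : Int),
    pvScan p l i (some (b, j)) =
      match pvScan p l i none with
      | none => some (b, j)
      | some (m, k) => if m ≤ b then some (m, k) else some (b, j) := by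
  intro l
  induction l with
  | nil => intro i b j; simp [pvScan]
  | cons el rest ih =>
    intro i b j
    by_cases hp : p el
    · simp only [pvScan, hp, if_pos]
      by_cases hle : el ≤ b
      · have he : (if el < b then some (el, i) else if el = b then some (el, i) else some (b, j)) = some (el, i) := by
          rcases lt_or_eq_of_le hle with h | h
          · simp [h]
          · simp [h]
        rw [he, ih (i + 1) el i]
        rcases hrest : pvScan p rest (i + 1) none with _ | ⟨m, k⟩
        · simp [hle]
        · by_cases hm : m ≤ el
          · simp [hm, le_trans hm hle]
          · simp [hm, hle]
      · have he : (if el < b then some (el, i) else if el = b then some (el, i) else some (b, j)) = some (b, j) := by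
          have h1 : ¬ el < b := fun h => hle (le_of_lt h)
          have h2 : el ≠ b := fun h => hle (le_of_eq h)
          simp [h1, h2]
        rw [he, ih (i + 1) b j, ih (i + 1) el i]
        rcases hrest : pvScan p rest (i + 1) none with _ | ⟨m, k⟩
        · simp [hle]
        · by_cases hm : m ≤ el
          · simp [hm]
          · have h3 : ¬ m ≤ b := by omega
            simp [hm, h3, hle]
    · simp only [pvScan, hp, if_neg, Bool.false_eq_true, not_false_iff]
      exact ih (i + 1) b j

theorem pvScan_eq_best (p : Int → Bool) : ∀ (l : List Int) (i : Int),
    pvScan p l i none = (pvBest p l).map (fun mk => (mk.1, i + (mk.2 : Int))) := by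
  intro l
  induction l with
  | nil => intro i; simp [pvScan, pvBest]
  | cons el rest ih =>
    intro i
    by_cases hp : p el
    · simp only [pvScan, hp, if_pos]
      rw [pvScan_acc, ih (i + 1)]
      rcases hb : pvBest p rest with _ | ⟨m, k⟩
      · simp [pvBest, hb, hp]
      · by_cases hlt : el < m
        · have h1 : ¬ m ≤ el := not_le.mpr hlt
          simp [pvBest, hb, hp, hlt, h1]
        · have h1 : m ≤ el := not_lt.mp hlt
          simp [pvBest, hb, hp, hlt, h1]
          omega
    · simp only [pvScan, hp, if_neg, Bool.false_eq_true, not_false_iff]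
      rw [ih (i + 1)]
      rcases hb : pvBest p rest with _ | ⟨m, k⟩
      · simp [pvBest, hb, hp]
      · simp [pvBest, hb, hp]
        omega

theorem pvBest_none_iff (p : Int → Bool) : ∀ (l : List Int), pvBest p l = none ↔ l.filter p = [] := by
  intro l
  induction l with
  | nil => simp [pvBest]
  | cons el rest ih =>
    by_cases hp : p el
    · rcases hb : pvBest p rest with _ | ⟨m, k⟩ <;>
        simp [pvBest, hb, hp, List.filter_cons] <;> split_ifs <;> simp
    · rcases hb : pvBest p rest with _ | ⟨m, k⟩ <;>
        simp [pvBest, hb, hp, List.filter_cons, ← ih, hb]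

theorem pvBest_props (p : Int → Bool) : ∀ (l : List Int) (m : Int) (k : Nat),
    pvBest p l = some (m, k) →
      k < l.length ∧ l[k]? = some m ∧ p m = true ∧ (∀ x ∈ l.filter p, m ≤ x) ∧
      (∀ t, k < t → t < l.length → ∀ x, l[t]? = some x → p x = true → x ≠ m) := by
  intro l
  induction l with
  | nil => intro m k h; simp [pvBest] at h
  | cons el rest ih =>
    intro m k h
    rcases hb : pvBest p rest with _ | ⟨m', k'⟩
    · have hfil : rest.filter p = [] := (pvBest_none_iff p rest).mp hb
      by_cases hp : p el
      · simp only [pvBest, hb, hp, if_pos] at h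
        obtain ⟨hm, hk⟩ : el = m ∧ 0 = k := by
          constructor <;> [exact congrArg (·.1) (Option.some.inj h); exact congrArg (·.2) (Option.some.inj h)]
        subst hm; subst hk
        refine ⟨by simp, by simp, hp, ?_, ?_⟩
        · intro x hx
          rw [List.filter_cons, if_pos hp, hfil] at hx
          simp at hx; omega
        · intro t ht htl x hx hpx
          have htx : x ∈ rest.filter p := by
            refine List.mem_filter.mpr ⟨?_, hpx⟩
            have : t - 1 < rest.length := by simp at htl; omega
            have : rest[t-1]? = some x := by
              rcases t with _ | t'
              · omega
              · simpa using hx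
            exact List.mem_of_getElem? this
          rw [hfil] at htx; simp at htx
      · simp [pvBest, hb, hp] at h
    · obtain ⟨hk', hget', hpm', hmin', hlast'⟩ := ih m' k' hb
      by_cases hcond : p el ∧ el < m'
      · simp only [pvBest, hb, if_pos hcond] at h
        obtain ⟨hm, hk⟩ : el = m ∧ 0 = k := by
          constructor <;> [exact congrArg (·.1) (Option.some.inj h); exact congrArg (·.2) (Option.some.inj h)]
        subst hm; subst hk
        refine ⟨by simp, by simp, hcond.1, ?_, ?_⟩
        · intro x hx
          rw [List.filter_cons, if_pos hcond.1] at hx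
          rcases List.mem_cons.mp hx with h1 | h1
          · omega
          · have := hmin' x h1; have := hcond.2; omega
        · intro t ht htl x hx hpx hxm
          have htx : x ∈ rest.filter p := by
            refine List.mem_filter.mpr ⟨?_, hpx⟩
            have : rest[t-1]? = some x := by
              rcases t with _ | t'
              · omega
              · simpa using hx
            exact List.mem_of_getElem? this
          have := hmin' x htx
          have := hcond.2
          omega
      · simp only [pvBest, hb, if_neg hcond] at h
        obtain ⟨hm, hk⟩ : m' = m ∧ k' + 1 = k := by
          constructor <;> [exact congrArg (·.1) (Option.some.inj h); exact congrArg (·.2) (Option.some.inj h)]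
        subst hm; subst hk
        refine ⟨by simpa using Nat.succ_lt_succ hk', by simpa using hget', hpm', ?_, ?_⟩
        · intro x hx
          rw [List.filter_cons] at hx
          by_cases hp : p el
          · rw [if_pos hp] at hx
            rcases List.mem_cons.mp hx with h1 | h1
            · subst h1
              by_contra hlt
              exact hcond ⟨hp, by omega⟩
            · exact hmin' x h1
          · rw [if_neg hp] at hx
            exact hmin' x hx
        · intro t ht htl x hx hpx
          rcases t with _ | t'
          · omega
          · have hx' : rest[t']? = some x := by simpa using hx
            exact hlast' t' (by omega) (by simpa using htl) x hx' hpx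

theorem pvBackFind_eq (l : List Int) (m : Int) : ∀ (n : Nat), n ≤ l.length → ∀ (k : Nat), k < n →
    l[k]? = some m → (∀ t, k < t → t < n → ∀ x, l[t]? = some x → x ≠ m) →
    pvBackFind l m n = some (k : Int) := by
  intro n
  induction n with
  | zero => intro _ k hk; omega
  | succ j ihn =>
    intro hn k hk hget hlast
    have hj : (j : Int) ≥ 0 := by positivity
    have hpg : PySem.List.pyGet? l (j : Int) = l[j]? := by
      simpa using PySem.List.pyGet?_natCast l j
    by_cases hkj : k = j
    · subst hkj
      simp [pvBackFind, hpg, hget]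
    · have hklt : k < j := by omega
      have hjl : j < l.length := by omega
      obtain ⟨x, hx⟩ : ∃ x, l[j]? = some x := ⟨l[j], List.getElem?_eq_getElem hjl⟩
      have hxm : x ≠ m := hlast j hklt (by omega) x hx
      have hcond : (PySem.List.pyGet? l (j : Int) == some m) = false := by
        rw [hpg, hx]
        simp [hxm]
      rw [pvBackFind, hcond]
      simp only [Bool.false_eq_true, if_neg, not_false_iff]
      exact ihn (by omega) k hklt hget (fun t h1 h2 => hlast t h1 (by omega))

theorem pvMin?_eq (xs : List Int) (m : Int) (hm : m ∈ xs) (hmin : ∀ x ∈ xs, m ≤ x) :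
    PySem.List.min? xs (fun x => x) = some m := by
  rcases h : PySem.List.min? xs (fun x => x) with _ | m'
  · rw [PySem.List.min?_eq_none_iff] at h
    subst h; simp at hm
  · have h1 : m' ∈ xs := PySem.List.min?_mem h
    have h2 : m' ≤ m := PySem.List.min?_isMin h m hm
    have h3 : m ≤ m' := hmin m' h1
    rw [le_antisymm h2 h3]

theorem pvCollectOdd_all (l : List Int) (h : ∀ el ∈ l, PySem.Int.mod el 2 = 1) :
    ∀ acc, pvCollectOdd acc l = some (acc ++ l) := by
  induction l with
  | nil => intro acc; simp [pvCollectOdd]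
  | cons el rest ih =>
    intro acc
    have he : (PySem.Int.mod el 2 == 1) = true := by
      rw [h el List.mem_cons_self]
      rfl
    rw [pvCollectOdd, he]
    simp only [if_pos]
    rw [ih (fun x hx => h x (List.mem_cons_of_mem el hx)) (acc ++ [el])]
    simp

-- main agreement argument, shared by both branches: under Pre_, A's (filter, min, backward scan)
-- and B's single pass both compute pvBest
theorem pvA_branch (l : List Int) (p : Int → Bool) (m : Int) (k : Nat)
    (hb : pvBest p l = some (m, k))
    (hval : ∀ x, x = m → p x = true) :
    pvBackFind l m l.length = some (k : Int) := by
  obtain ⟨hk, hget, hpm, hmin, hlast⟩ := pvBest_props p l m k hb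
  exact pvBackFind_eq l m l.length le_rfl k hk hget
    (fun t h1 h2 x hx hxm => (hlast t h1 h2 x hx (hval x hxm)) hxm)

-- ===== VERDICT (by name: the statement is the Claim_ definition above) =====
theorem get_min_even_odd_spec : Claim_equal_get_min_even_odd := by
  unfold Claim_equal_get_min_even_odd
  intro num_list num_type _ hpre
  unfold Spec_get_min_even_odd
  by_cases hodd : num_type = "odd"
  · subst hodd
    obtain ⟨hne, hall⟩ := hpre.1 rfl
    -- A side
    have hA : get_min_even_odd num_list "odd" =
        match PySem.List.min? num_list (fun x => x) with
        | none => none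
        | some min_odd => pvBackFind num_list min_odd num_list.length := by
      unfold get_min_even_odd
      rw [pvCollectOdd_all num_list hall []]
      simp
    -- best over the whole list (p = true)
    have hfil : num_list.filter (fun _ => true) = num_list := List.filter_true num_list
    have hbs : pvBest (fun _ => true) num_list ≠ none := by
      rw [ne_eq, pvBest_none_iff, hfil]
      exact hne
    rcases hbse : pvBest (fun _ => true) num_list with _ | ⟨m, k⟩
    · exact absurd hbse hbs
    obtain ⟨hk, hget, _, hmin, hlast⟩ := pvBest_props _ num_list m k hbse
    have hmem : m ∈ num_list := List.mem_of_getElem? hget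
    have hminall : ∀ x ∈ num_list, m ≤ x := by
      intro x hx; exact hmin x (by rwa [hfil])
    rw [hA, pvMin?_eq num_list m hmem hminall]
    show pvBackFind num_list m num_list.length = get_min_even_odd_alt num_list "odd"
    rw [pvA_branch num_list (fun _ => true) m k hbse (fun x _ => rfl)]
    -- B side
    have hanyf : num_list.any (fun el => PySem.Int.mod el 2 == 0) = false := by
      rw [List.any_eq_false]
      intro el hel
      rw [hall el hel]
      decide
    unfold get_min_even_odd_alt
    rw [if_neg (by decide), if_pos (by decide), hanyf]
    simp only [Bool.false_eq_true, if_neg, not_false_iff]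
    rw [pvScan_eq_best, hbse]
    simp
  · by_cases heven : num_type = "even"
    · subst heven
      obtain ⟨e, he, hemod⟩ := hpre.2 rfl
      have hfold : num_list.foldl (fun acc el => if PySem.Int.mod el 2 == 0 then acc ++ [el] else acc) [] =
          num_list.filter (fun el => PySem.Int.mod el 2 == 0) := by
        simpa using PySem.List.foldl_append_if_eq_filter (fun el => PySem.Int.mod el 2 == 0) num_list []
      have hfe : e ∈ num_list.filter (fun el => PySem.Int.mod el 2 == 0) :=
        List.mem_filter.mpr ⟨he, by rw [hemod]; rfl⟩
      have hfne : num_list.filter (fun el => PySem.Int.mod el 2 == 0) ≠ [] := by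
        intro h; rw [h] at hfe; simp at hfe
      have hbs : pvBest (fun el => PySem.Int.mod el 2 == 0) num_list ≠ none := by
        rw [ne_eq, pvBest_none_iff]; exact hfne
      rcases hbse : pvBest (fun el => PySem.Int.mod el 2 == 0) num_list with _ | ⟨m, k⟩
      · exact absurd hbse hbs
      obtain ⟨hk, hget, hpm, hmin, hlast⟩ := pvBest_props _ num_list m k hbse
      have hmem : m ∈ num_list.filter (fun el => PySem.Int.mod el 2 == 0) :=
        List.mem_filter.mpr ⟨List.mem_of_getElem? hget, hpm⟩
      -- A side
      have hlen0 : (num_list.filter (fun el => PySem.Int.mod el 2 == 0)).length ≠ 0 :=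
        fun h => hfne (List.length_eq_zero_iff.mp h)
      have hlen : ((num_list.filter (fun el => PySem.Int.mod el 2 == 0)).length == 0) = false :=
        beq_eq_false_iff_ne.mpr hlen0
      unfold get_min_even_odd
      rw [if_neg (by decide), if_pos (by decide)]
      simp only [hfold]
      rw [hlen]
      simp only [Bool.false_eq_true, if_neg, not_false_iff]
      rw [pvMin?_eq _ m hmem (fun x hx => hmin x hx)]
      show pvBackFind num_list m num_list.length = get_min_even_odd_alt num_list "even"
      rw [pvA_branch num_list (fun el => PySem.Int.mod el 2 == 0) m k hbse
          (fun x hx => by rw [hx]; exact hpm)]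
      -- B side
      unfold get_min_even_odd_alt
      rw [if_pos (by decide)]
      rw [pvScan_eq_best, hbse]
      simp
    · unfold get_min_even_odd get_min_even_odd_alt
      rw [if_neg (by simp [hodd]), if_neg (by simp [heven]),
        if_neg (by simp [heven]), if_neg (by simp [hodd])]
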